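-- pv_equiv track=rewrite | github.com/mattia-barbaresi/NohGenerator | markov/markov.py | chunk_segmentation
-- ===== SOURCE A (Python) =====
-- def _key_selector(x):
--     return len(x)
--
-- def chunk_segmentation(bag, pos, sq):
--     """
--     Return the list of token (in bag) that match sq
--     """
--     arr = []
--     # first char
--     i = 0
--     while i < len(sq):
--         search_str = " ".join(sq[i:])
--         # search search_str in words bag
--         # actually select the longer chunk that match initial position in search_str
--         ind = ""
--         # order chunks by ascending length and pick the first match
--         for w in sorted(bag, key=_key_selector):
--             if search_str.find(w) == 0:
--                 ind = w
--         if ind: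
--             # match
--             arr.append(ind)
--             i = i + len(ind.split(" "))
--         else:
--             i = i + 1
--         # if search_str is not empty, detection has failed
--     return arr
-- ===== SOURCE B (Python) =====
-- def chunk_segmentation(bag, pos, sq):
--     """
--     Return the list of token (in bag) that match sq
--     """
--     # dictionary lookup instead of scanning the bag: hash the chunks once,
--     # then per position probe prefixes of the remaining string by decreasing
--     # length (word-break style); no sorting at all
--     words = set(bag)
--     max_len = max(map(len, bag), default=0)
--     arr = []
--     i = 0
--     n = len(sq)
--     while i < n:
--         s = " ".join(sq[i:])
--         w = ""
--         for k in range(min(max_len, len(s)), 0, -1):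
--             if s[:k] in words:
--                 w = s[:k]
--                 break
--         if w:
--             arr.append(w)
--             i += len(w.split(" "))
--         else:
--             i += 1
--     return arr
-- ===== Notes on version B (the rewrite author's own statement) =====
-- stated objective: faster
-- what changed: B never sorts and never iterates over the bag per position: it hashes the chunks into a set once, and at each position probes prefixes of the remaining joined string by decreasing length with a set-membership test (word-break style), taking the first (= longest) hit.
import Mathlib
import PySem

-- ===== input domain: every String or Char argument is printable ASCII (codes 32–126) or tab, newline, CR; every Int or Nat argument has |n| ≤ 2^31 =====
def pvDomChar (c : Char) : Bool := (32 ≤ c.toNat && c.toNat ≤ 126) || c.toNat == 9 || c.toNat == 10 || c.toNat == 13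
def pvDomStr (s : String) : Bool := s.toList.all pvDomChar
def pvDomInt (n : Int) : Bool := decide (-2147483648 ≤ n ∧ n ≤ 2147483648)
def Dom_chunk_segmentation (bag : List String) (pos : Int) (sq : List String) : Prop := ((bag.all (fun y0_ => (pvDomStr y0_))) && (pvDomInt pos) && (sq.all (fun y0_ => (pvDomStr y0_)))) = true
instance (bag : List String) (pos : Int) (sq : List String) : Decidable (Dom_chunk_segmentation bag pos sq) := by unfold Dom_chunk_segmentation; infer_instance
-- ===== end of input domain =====

-- B replaces A's per-position sort-and-scan of the bag by a chunk set built once plus,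
-- per position, prefix probes of the remaining string by decreasing length; same return value.

-- termination helper for both loops: s.split(" ") is never empty
theorem pv_go_len (sep : List Char) (fuel : ℕ) (l cur : List Char) (acc : List (List Char)) :
    acc.length < (PySem.Chars.splitOn.go sep fuel l cur acc).length := by
  induction fuel generalizing l cur acc with
  | zero => simp [PySem.Chars.splitOn.go]
  | succ n ih =>
    cases l with
    | nil => simp [PySem.Chars.splitOn.go]
    | cons c rest =>
      rw [PySem.Chars.splitOn.go]
      split
      · have := ih (List.drop sep.length (c :: rest)) [] (cur.reverse :: acc)
        simp at this ⊢; omega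
      · exact ih rest (c :: cur) acc

theorem pv_split_sp_len_pos (s : String) : 0 < ((PySem.Str.split? s " ").getD []).length := by
  simp [PySem.Str.split?, PySem.Chars.split?, PySem.Chars.splitOn]
  have := pv_go_len [' '] (s.toList.length + 1) s.toList [] []
  simpa using this

-- ===== PORT A =====
def pvKeySelector (x : String) : Int := PySem.Str.len x   -- _key_selector

-- the while-loop of A: per position re-join sq[i:], re-sort the bag ascending by length
-- and fold over all of it keeping the LAST prefix match
def pvLoopA (bag : List String) (sq : List String) (i : Nat) (arr : List String) : List String :=
  if h : i < sq.length then
    let search_str := PySem.Str.join " " (PySem.List.slice sq (some (i : Int)) none)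
    let ind := (PySem.List.sorted bag pvKeySelector).foldl
        (fun acc w => if PySem.Str.find search_str w == 0 then w else acc) ""
    if ind ≠ "" then
      pvLoopA bag sq (i + ((PySem.Str.split? ind " ").getD []).length) (arr ++ [ind])
    else
      pvLoopA bag sq (i + 1) arr
  else arr
termination_by sq.length - i
decreasing_by
  · exact Nat.sub_lt_sub_left h (Nat.lt_add_of_pos_right (pv_split_sp_len_pos _))
  · omega

def chunk_segmentation (bag : List String) (pos : Int) (sq : List String) : List String :=
  pvLoopA bag sq 0 []

-- ===== PORT B =====
-- inner 'for k in range(min(max_len, len(s)), 0, -1): if s[:k] in words: break' loop: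
-- structural recursion on k; s[:k] with 0 ≤ k ≤ len(s) is s.take k (exact there)
def pvFindK (words : PySem.Set String) (s : List Char) : Nat → String
  | 0 => ""
  | k + 1 =>
    let cand := String.ofList (s.take (k + 1))
    if PySem.Set.contains words cand then cand else pvFindK words s k

-- the while-loop of B: join the suffix, probe prefixes by decreasing length
def pvLoopB (words : PySem.Set String) (maxLen : Nat) (sq : List String) (i : Nat) (arr : List String) : List String :=
  if h : i < sq.length then
    let s := (PySem.Str.join " " (sq.drop i)).toList
    let w := pvFindK words s (min maxLen s.length)
    if w ≠ "" then
      pvLoopB words maxLen sq (i + ((PySem.Str.split? w " ").getD []).length) (arr ++ [w])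
    else
      pvLoopB words maxLen sq (i + 1) arr
  else arr
termination_by sq.length - i
decreasing_by
  · exact Nat.sub_lt_sub_left h (Nat.lt_add_of_pos_right (pv_split_sp_len_pos _))
  · omega

def chunk_segmentation_alt (bag : List String) (pos : Int) (sq : List String) : List String :=
  -- words = set(bag); max_len = max(map(len, bag), default=0) (max as a fold)
  pvLoopB (PySem.Set.ofList bag) (bag.foldl (fun m w => max m w.toList.length) 0) sq 0 []

-- ===== PRECONDITION & SPEC =====
def Spec_chunk_segmentation (bag : List String) (pos : Int) (sq : List String) (out : List String) : Prop := out = chunk_segmentation_alt bag pos sq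
instance (bag : List String) (pos : Int) (sq : List String) (out : List String) : Decidable (Spec_chunk_segmentation bag pos sq out) := by unfold Spec_chunk_segmentation; infer_instance

-- ===== CLAIM (what is proved, stated in full; the proofs are below) =====
def Claim_equal_chunk_segmentation : Prop := ∀ (bag : List String) (pos : Int) (sq : List String), Dom_chunk_segmentation bag pos sq → Spec_chunk_segmentation bag pos sq (chunk_segmentation bag pos sq)

-- ===== LEMMAS AND PROOFS =====

-- the value both per-position searches compute: the longest chunk in bag that is a
-- prefix of s, or "" if there is none (same-length prefixes of s are equal strings,
-- so this determines the value uniquely)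
def pvGood (bag : List String) (s : List Char) (r : String) : Prop :=
  (∀ w ∈ bag, w.toList <+: s → w.toList.length ≤ r.toList.length) ∧
    (r = "" ∨ (r ∈ bag ∧ r.toList <+: s))

theorem pvGood_unique (bag : List String) (s : List Char) (r1 r2 : String)
    (h1 : pvGood bag s r1) (h2 : pvGood bag s r2) : r1 = r2 := by
  obtain ⟨b1, m1⟩ := h1
  obtain ⟨b2, m2⟩ := h2
  have empty_case : ∀ r r' : String, r = "" →
      (∀ w ∈ bag, w.toList <+: s → w.toList.length ≤ r.toList.length) →
      (r' = "" ∨ (r' ∈ bag ∧ r'.toList <+: s)) → r' = "" := by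
    intro r r' hr hb hm
    rcases hm with h | ⟨hmem, hpre⟩
    · exact h
    · have := hb r' hmem hpre
      rw [hr] at this
      simp at this
      exact String.toList_inj.mp (by simpa using this)
  rcases m1 with h1e | ⟨hm1, hp1⟩
  · exact h1e.trans (empty_case r1 r2 h1e b1 m2).symm
  · rcases m2 with h2e | ⟨hm2, hp2⟩
    · exact (empty_case r2 r1 h2e b2 (Or.inr ⟨hm1, hp1⟩)).trans h2e.symm
    · have l12 := b2 r1 hm1 hp1
      have l21 := b1 r2 hm2 hp2
      have hlen : r1.toList.length = r2.toList.length := le_antisymm l12 l21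
      have e1 : r1.toList = s.take r1.toList.length := (List.prefix_iff_eq_take.mp hp1)
      have e2 : r2.toList = s.take r2.toList.length := (List.prefix_iff_eq_take.mp hp2)
      apply String.toList_inj.mp
      rw [e1, e2, hlen]

-- ---- A side: last match of the fold over the ascending-sorted bag is pvGood ----

-- the last match of a left fold is the first match of the reversed list
theorem pv_foldl_lastMatch {α : Type} (p : α → Bool) (l : List α) (d : α) :
    l.foldl (fun a w => if p w then w else a) d = (l.reverse.find? p).getD d := by
  induction l generalizing d with
  | nil => simp
  | cons x t ih =>
    simp only [List.foldl_cons, List.reverse_cons, List.find?_append, ih]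
    cases h : t.reverse.find? p <;> by_cases hx : p x <;> simp [hx, Option.or]

-- search_str.find(w) == 0  is exactly  search_str.startswith(w)
theorem pv_find_zero_iff (s w : String) :
    (PySem.Str.find s w == 0) = PySem.Str.startswith s w := by
  simp only [PySem.Str.find_eq, PySem.Str.startswith_eq]
  by_cases hp : w.toList <+: s.toList
  · have h0 : 0 ≤ PySem.Chars.find s.toList w.toList :=
      (PySem.Chars.find_nonneg_iff _ _).mpr hp.isInfix
    obtain ⟨h1, h2⟩ := PySem.Chars.find_spec h0
    have hz : (PySem.Chars.find s.toList w.toList).toNat = 0 := by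
      by_contra h
      exact h2 0 (Nat.pos_of_ne_zero h) (by simpa using hp)
    have hz' : PySem.Chars.find s.toList w.toList = 0 := by omega
    rw [hz', ((PySem.Chars.startswith_iff _ _).mpr hp)]
    rfl
  · have hne : PySem.Chars.find s.toList w.toList ≠ 0 := by
      intro h
      have h0 : 0 ≤ PySem.Chars.find s.toList w.toList := by omega
      obtain ⟨h1, _⟩ := PySem.Chars.find_spec h0
      rw [h] at h1; simp at h1; exact hp h1
    have hsw : PySem.Chars.startswith s.toList w.toList = false := by
      rw [← Bool.not_eq_true, PySem.Chars.startswith_iff]; exact hp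
    rw [hsw, beq_eq_false_iff_ne]
    exact hne

-- first match of a list that is pairwise key-descending bounds every later match
theorem pv_find_desc_bound {α : Type} (key : α → Nat) (p : α → Bool) (l : List α) (x : α)
    (hpair : l.Pairwise (fun a b => key b ≤ key a)) (hfind : l.find? p = some x) :
    ∀ w ∈ l, p w → key w ≤ key x := by
  induction l with
  | nil => simp at hfind
  | cons a t ih =>
    by_cases ha : p a
    · rw [List.find?_cons_of_pos ha] at hfind
      obtain rfl : a = x := by simpa using hfind
      intro w hw _
      rcases List.mem_cons.mp hw with rfl | hw
      · exact le_refl _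
      · exact (List.pairwise_cons.mp hpair).1 w hw
    · rw [List.find?_cons_of_neg ha] at hfind
      intro w hw hpw
      rcases List.mem_cons.mp hw with rfl | hw
      · exact absurd hpw ha
      · exact ih (List.pairwise_cons.mp hpair).2 hfind w hw hpw

theorem pvGood_A (bag : List String) (s : String) :
    pvGood bag s.toList
      (((PySem.List.sorted bag pvKeySelector).reverse.find?
          (fun w => PySem.Str.startswith s w)).getD "") := by
  have hmem : ∀ w : String, w ∈ (PySem.List.sorted bag pvKeySelector).reverse ↔ w ∈ bag := by
    intro w; rw [List.mem_reverse, PySem.List.mem_sorted]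
  have hsw : ∀ w : String, PySem.Str.startswith s w = true ↔ w.toList <+: s.toList := by
    intro w
    rw [PySem.Str.startswith_eq]
    exact PySem.Chars.startswith_iff _ _
  cases hfind : (PySem.List.sorted bag pvKeySelector).reverse.find? (fun w => PySem.Str.startswith s w) with
  | none =>
    have hnone := List.find?_eq_none.mp hfind
    constructor
    · intro w hw hpre
      exact absurd ((hsw w).mpr hpre) (by simpa using hnone w ((hmem w).mpr hw))
    · exact Or.inl rfl
  | some x =>
    have hpair : ((PySem.List.sorted bag pvKeySelector).reverse).Pairwise
        (fun a b : String => b.toList.length ≤ a.toList.length) := by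
      have := PySem.List.sorted_pairwise (xs := bag) (key := pvKeySelector)
      have h2 := List.Pairwise.reverse this
      refine h2.imp ?_
      intro a b hab
      simp only [pvKeySelector, PySem.Str.len_eq] at hab
      exact_mod_cast hab
    have hxmem : x ∈ (PySem.List.sorted bag pvKeySelector).reverse := List.mem_of_find?_eq_some hfind
    have hxp : PySem.Str.startswith s x = true := List.find?_some hfind
    constructor
    · intro w hw hpre
      exact pv_find_desc_bound (fun w : String => w.toList.length) _ _ x hpair hfind w
        ((hmem w).mpr hw) ((hsw w).mpr hpre)
    · exact Or.inr ⟨(hmem x).mp hxmem, (hsw x).mp hxp⟩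

-- ---- B side: the decreasing-length prefix probe is pvGood ----

theorem pv_maxlen (bag : List String) :
    ∀ w ∈ bag, w.toList.length ≤ bag.foldl (fun m w => max m w.toList.length) 0 := by
  have gen : ∀ (l : List String) (a : Nat), ∀ w ∈ l,
      w.toList.length ≤ l.foldl (fun m w => max m w.toList.length) a := by
    have incr : ∀ (l' : List String) (a : Nat),
        a ≤ l'.foldl (fun m w => max m w.toList.length) a := by
      intro l'
      induction l' with
      | nil => intro a; exact le_refl a
      | cons y t' ih' => intro a; exact le_trans (le_max_left _ _) (ih' (max a y.toList.length))
    intro l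
    induction l with
    | nil => intro a w hw; simp at hw
    | cons x t ih =>
      intro a w hw
      rcases List.mem_cons.mp hw with rfl | hw
      · simp only [List.foldl_cons]
        exact le_trans (le_max_right _ _) (incr t _)
      · exact ih _ w hw
  exact gen bag 0

theorem pvGood_B (bag : List String) (s : List Char) (k : Nat)
    (hk : ∀ w ∈ bag, w.toList <+: s → w.toList.length ≤ k) :
    pvGood bag s (pvFindK (PySem.Set.ofList bag) s k) := by
  induction k with
  | zero =>
    constructor
    · intro w hw hpre
      have h0 : w.toList.length = 0 := Nat.le_zero.mp (hk w hw hpre)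
      simp [pvFindK, h0]
    · exact Or.inl rfl
  | succ k ih =>
    rw [pvFindK]
    by_cases hc : PySem.Set.contains (PySem.Set.ofList bag) (String.ofList (s.take (k + 1))) = true
    · simp only [hc, if_true]
      have hmem : String.ofList (s.take (k + 1)) ∈ bag := by
        have := (PySem.Set.contains_iff _ _).mp hc
        rwa [PySem.Set.mem_ofList] at this
      constructor
      · intro w hw hpre
        have h1 : w.toList.length ≤ k + 1 := hk w hw hpre
        have h2 : w.toList.length ≤ s.length := hpre.length_le
        simp only [String.toList_ofList, List.length_take]
        omega
      · exact Or.inr ⟨hmem, by simpa [String.toList_ofList] using List.take_prefix (k + 1) s⟩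
    · simp only [hc, Bool.false_eq_true, if_false]
      apply ih
      intro w hw hpre
      have h1 : w.toList.length ≤ k + 1 := hk w hw hpre
      by_contra hgt
      have hlen : w.toList.length = k + 1 := by omega
      have hweq : w.toList = s.take (k + 1) := by
        rw [List.prefix_iff_eq_take.mp hpre, hlen]
      have : w = String.ofList (s.take (k + 1)) := by
        apply String.toList_inj.mp
        simpa [String.toList_ofList] using hweq
      apply hc
      rw [PySem.Set.contains_iff, PySem.Set.mem_ofList, ← this]
      exact hw

-- ---- the loops agree position by position ----

set_option maxHeartbeats 1000000 in
theorem pv_loop_eq (bag sq : List String) (i : Nat) (arr : List String) :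
    pvLoopA bag sq i arr =
      pvLoopB (PySem.Set.ofList bag) (bag.foldl (fun m w => max m w.toList.length) 0) sq i arr := by
  rw [pvLoopA, pvLoopB]
  by_cases h : i < sq.length
  · simp only [h, dite_true]
    have hs : PySem.List.slice sq (some (i : Int)) none = sq.drop i :=
      PySem.List.slice_from_natCast sq i
    have hfun : (fun (w : String) => PySem.Str.find (PySem.Str.join " " (PySem.List.slice sq (some (i : Int)) none)) w == 0)
        = (fun (w : String) => PySem.Str.startswith (PySem.Str.join " " (sq.drop i)) w) := by
      rw [hs]
      funext w
      rw [pv_find_zero_iff]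
    have hA : (PySem.List.sorted bag pvKeySelector).foldl
        (fun acc w => if PySem.Str.find (PySem.Str.join " " (PySem.List.slice sq (some (i : Int)) none)) w == 0 then w else acc) "" =
        (((PySem.List.sorted bag pvKeySelector).reverse.find?
            (fun w => PySem.Str.startswith (PySem.Str.join " " (sq.drop i)) w)).getD "") := by
      rw [pv_foldl_lastMatch]
      rw [hfun]
    have hgA := pvGood_A bag (PySem.Str.join " " (sq.drop i))
    have hgB := pvGood_B bag (PySem.Str.join " " (sq.drop i)).toList
      (min (bag.foldl (fun m w => max m w.toList.length) 0) (PySem.Str.join " " (sq.drop i)).toList.length)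
      (by
        intro w hw hpre
        exact le_min (pv_maxlen bag w hw) hpre.length_le)
    have heq := pvGood_unique bag (PySem.Str.join " " (sq.drop i)).toList _ _ hgA hgB
    rw [hA, heq]
    split
    · exact pv_loop_eq bag sq _ _
    · exact pv_loop_eq bag sq _ _
  · simp [h]
termination_by sq.length - i
decreasing_by
  all_goals first
    | exact Nat.sub_lt_sub_left h (Nat.lt_add_of_pos_right (pv_split_sp_len_pos _))
    | omega

-- ===== VERDICT (by name: the statement is the Claim_ definition above) =====
theorem chunk_segmentation_spec : Claim_equal_chunk_segmentation := by
  intro bag pos sq _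
  unfold Spec_chunk_segmentation chunk_segmentation chunk_segmentation_alt
  exact pv_loop_eq bag sq 0 []
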